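-- pv_equiv track=rewrite | github.com/nibaldox/conciliacion-geo-v02 | ui/tabs/export.py | _build_section_status_map
-- ===== SOURCE A (Python) =====
-- def _build_section_status_map(comp_results: list) -> dict:
--     section_status = {}
--     for c in comp_results:
--         sec = c.get('section', '')
--         statuses = [c.get('height_status', ''), c.get('angle_status', ''), c.get('berm_status', '')]
--         if sec not in section_status:
--             section_status[sec] = 'CUMPLE'
--         if 'NO CUMPLE' in statuses:
--             section_status[sec] = 'NO CUMPLE'
--         elif 'FUERA DE TOLERANCIA' in statuses and section_status[sec] != 'NO CUMPLE':
--             section_status[sec] = 'FUERA DE TOLERANCIA'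
--     return section_status
-- ===== SOURCE B (Python) =====
-- def _build_section_status_map(comp_results: list) -> dict:
--     # Group-then-reduce: first collapse each item to its own status and group
--     # by section, then reduce each group to its worst status.
--     groups = {}
--     for c in comp_results:
--         statuses = [c.get('height_status', ''), c.get('angle_status', ''), c.get('berm_status', '')]
--         if 'NO CUMPLE' in statuses:
--             item = 'NO CUMPLE'
--         elif 'FUERA DE TOLERANCIA' in statuses:
--             item = 'FUERA DE TOLERANCIA'
--         else:
--             item = 'CUMPLE'
--         groups.setdefault(c.get('section', ''), []).append(item)
--     result = {}
--     for sec, items in groups.items():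
--         if 'NO CUMPLE' in items:
--             result[sec] = 'NO CUMPLE'
--         elif 'FUERA DE TOLERANCIA' in items:
--             result[sec] = 'FUERA DE TOLERANCIA'
--         else:
--             result[sec] = 'CUMPLE'
--     return result
-- ===== Notes on version B (the rewrite author's own statement) =====
-- stated objective: alternative
-- what changed: Replaces A's single pass with a running per-section accumulator (conditional in-place upgrades) by a group-then-reduce shape: one pass collapses each item to its own status and groups statuses per section, a second pass reduces each group to its worst status.
import Mathlib
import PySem

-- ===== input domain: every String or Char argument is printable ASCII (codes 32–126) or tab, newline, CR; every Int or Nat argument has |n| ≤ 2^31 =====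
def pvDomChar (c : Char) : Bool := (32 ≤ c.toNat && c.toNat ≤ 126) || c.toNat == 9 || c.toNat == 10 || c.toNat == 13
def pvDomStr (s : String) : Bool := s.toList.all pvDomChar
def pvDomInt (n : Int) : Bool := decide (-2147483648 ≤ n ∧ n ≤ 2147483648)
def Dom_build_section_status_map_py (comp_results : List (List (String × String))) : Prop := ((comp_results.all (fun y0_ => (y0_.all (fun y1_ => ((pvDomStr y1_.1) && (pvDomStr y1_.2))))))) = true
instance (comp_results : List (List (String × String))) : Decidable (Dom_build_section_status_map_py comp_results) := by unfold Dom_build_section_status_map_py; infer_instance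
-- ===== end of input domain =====

-- B replaces A's single running-accumulator pass by a group-then-reduce shape (same cost); return-value equivalence proved.

-- ===== PORT A =====
-- one iteration of A's loop body (c is the item dict; section_status[sec] is ported as getD sec "", exact since sec is always present there)
def pvStepA (d : PySem.Dict String String) (c : List (String × String)) : PySem.Dict String String :=
  let cd := PySem.Dict.mk c
  let sec := cd.getD "section" ""
  let statuses := [cd.getD "height_status" "", cd.getD "angle_status" "", cd.getD "berm_status" ""]
  let d1 := if d.contains sec then d else d.insert sec "CUMPLE"
  if "NO CUMPLE" ∈ statuses then d1.insert sec "NO CUMPLE"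
  else if "FUERA DE TOLERANCIA" ∈ statuses ∧ d1.getD sec "" ≠ "NO CUMPLE" then
    d1.insert sec "FUERA DE TOLERANCIA"
  else d1

def build_section_status_map_py (comp_results : List (List (String × String))) : List (String × String) :=
  (comp_results.foldl pvStepA PySem.Dict.empty).items

-- ===== PORT B =====
-- one iteration of B's grouping loop; groups.setdefault(sec, []).append(item) is ported as Dict.modify sec [] (· ++ [item]) (exact: same key placement and in-place update)
def pvStepB (g : PySem.Dict String (List String)) (c : List (String × String)) : PySem.Dict String (List String) :=
  let cd := PySem.Dict.mk c
  let statuses := [cd.getD "height_status" "", cd.getD "angle_status" "", cd.getD "berm_status" ""]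
  let item := if "NO CUMPLE" ∈ statuses then "NO CUMPLE"
    else if "FUERA DE TOLERANCIA" ∈ statuses then "FUERA DE TOLERANCIA"
    else "CUMPLE"
  g.modify (cd.getD "section" "") [] (· ++ [item])

def build_section_status_map_py_alt (comp_results : List (List (String × String))) : List (String × String) :=
  let groups := comp_results.foldl pvStepB PySem.Dict.empty
  (groups.items.foldl (fun r p =>
    if "NO CUMPLE" ∈ p.2 then r.insert p.1 "NO CUMPLE"
    else if "FUERA DE TOLERANCIA" ∈ p.2 then r.insert p.1 "FUERA DE TOLERANCIA"
    else r.insert p.1 "CUMPLE") PySem.Dict.empty).items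

-- ===== PRECONDITION & SPEC =====
def Spec_build_section_status_map_py (comp_results : List (List (String × String))) (out : List (String × String)) : Prop := out = build_section_status_map_py_alt comp_results
instance (comp_results : List (List (String × String))) (out : List (String × String)) : Decidable (Spec_build_section_status_map_py comp_results out) := by unfold Spec_build_section_status_map_py; infer_instance

-- ===== CLAIM (what is proved, stated in full; the proofs are below) =====
def Claim_equal_build_section_status_map_py : Prop := ∀ (comp_results : List (List (String × String))), Dom_build_section_status_map_py comp_results → Spec_build_section_status_map_py comp_results (build_section_status_map_py comp_results)

-- ===== LEMMAS AND PROOFS =====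

-- the worst status of a list of statuses (B's reduction step)
def pvWorst (l : List String) : String :=
  if "NO CUMPLE" ∈ l then "NO CUMPLE"
  else if "FUERA DE TOLERANCIA" ∈ l then "FUERA DE TOLERANCIA" else "CUMPLE"

-- pointwise reduction of a groups dict
def pvMapWorst (g : PySem.Dict String (List String)) : PySem.Dict String String :=
  PySem.Dict.mk (g.items.map (fun p => (p.1, pvWorst p.2)))

theorem pvWorst_of_NC {L : List String} (h : "NO CUMPLE" ∈ L) : pvWorst L = "NO CUMPLE" := by
  simp [pvWorst, h]

theorem pvWorst_ne_NC {L : List String} (h : "NO CUMPLE" ∉ L) : pvWorst L ≠ "NO CUMPLE" := by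
  simp only [pvWorst, if_neg h]
  split_ifs <;> decide

theorem pvWorst_append_NC (L : List String) : pvWorst (L ++ ["NO CUMPLE"]) = "NO CUMPLE" := by
  simp [pvWorst]

theorem pvWorst_append_FT {L : List String} (h : "NO CUMPLE" ∉ L) :
    pvWorst (L ++ ["FUERA DE TOLERANCIA"]) = "FUERA DE TOLERANCIA" := by
  simp [pvWorst, h]

theorem pvWorst_append_C (L : List String) : pvWorst (L ++ ["CUMPLE"]) = pvWorst L := by
  simp [pvWorst]

theorem get?_pvMapWorst (g : PySem.Dict String (List String)) (k : String) :
    (pvMapWorst g).get? k = (g.get? k).map pvWorst := by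
  obtain ⟨l⟩ := g
  induction l with
  | nil => rfl
  | cons p t ih =>
    obtain ⟨a, b⟩ := p
    by_cases h : (a == k) = true
    · simp [pvMapWorst, PySem.Dict.get?_mk_cons, h]
    · simp only [pvMapWorst, List.map_cons, PySem.Dict.get?_mk_cons, h] at ih ⊢
      exact ih

theorem contains_pvMapWorst (g : PySem.Dict String (List String)) (k : String) :
    (pvMapWorst g).contains k = g.contains k := by
  rw [PySem.Dict.contains_eq_isSome_get?, PySem.Dict.contains_eq_isSome_get?, get?_pvMapWorst]
  cases g.get? k <;> rfl

theorem keys_pvMapWorst (g : PySem.Dict String (List String)) :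
    (pvMapWorst g).keys = g.keys := by
  simp [pvMapWorst, PySem.Dict.keys]

theorem pvMapWorst_insert (g : PySem.Dict String (List String)) (k : String) (v : List String) :
    pvMapWorst (g.insert k v) = (pvMapWorst g).insert k (pvWorst v) := by
  apply PySem.Dict.ext
  show ((g.insert k v).items.map _) = ((pvMapWorst g).insert k (pvWorst v)).items
  rw [PySem.Dict.items_insert, PySem.Dict.items_insert, contains_pvMapWorst]
  by_cases h : g.contains k = true
  · simp only [h, if_true, pvMapWorst, List.map_map]
    apply List.map_congr_left
    intro p _
    by_cases hk : p.1 = k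
    · simp [hk]
    · simp [hk]
  · simp [h, pvMapWorst]

-- inserting a key with its current value is the identity (keys unique)
theorem insert_get?_self (d : PySem.Dict String String) (k : String) (v : String)
    (hnd : d.keys.Nodup) (h : d.get? k = some v) : d.insert k v = d := by
  apply PySem.Dict.ext
  rw [PySem.Dict.items_insert]
  have hc : d.contains k = true := by
    rw [PySem.Dict.contains_eq_isSome_get?, h]; rfl
  rw [if_pos hc]
  obtain ⟨l⟩ := d
  simp only [PySem.Dict.keys] at hnd
  clear hc
  induction l with
  | nil => simp [PySem.Dict.get?] at h
  | cons p t ih =>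
    obtain ⟨a, b⟩ := p
    rw [PySem.Dict.get?_mk_cons] at h
    simp only [List.map_cons, List.nodup_cons] at hnd
    by_cases hk : (a == k) = true
    · have hak : a = k := by simpa using hk
      have hbv : b = v := by rw [if_pos hk] at h; exact Option.some_inj.mp h
      simp only [List.map_cons, if_pos hk, List.cons.injEq]
      refine ⟨by simp [hak, hbv], ?_⟩
      refine (List.map_congr_left ?_).trans (List.map_id t)
      intro q hq
      have hqk : (q.1 == k) = false := by
        apply beq_false_of_ne
        intro hqk
        exact hnd.1 (by rw [← hak] at hqk; exact hqk ▸ List.mem_map_of_mem hq)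
      simp [hqk]
    · rw [if_neg hk] at h
      simp only [List.map_cons, if_neg hk, List.cons.injEq, true_and]
      exact ih hnd.2 h

theorem step_eq (g : PySem.Dict String (List String)) (c : List (String × String))
    (hnd : g.keys.Nodup) : pvStepA (pvMapWorst g) c = pvMapWorst (pvStepB g c) := by
  simp only [pvStepA, pvStepB, PySem.Dict.modify, pvMapWorst_insert]
  set cd := PySem.Dict.mk c
  set sec := cd.getD "section" "" with hsec
  set statuses := [cd.getD "height_status" "", cd.getD "angle_status" "", cd.getD "berm_status" ""] with hst
  set L := g.getD sec [] with hL
  by_cases hc : g.contains sec = true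
  · -- section already seen
    have hmc : (pvMapWorst g).contains sec = true := by rw [contains_pvMapWorst]; exact hc
    obtain ⟨L', hL'⟩ : ∃ L', g.get? sec = some L' := by
      rw [PySem.Dict.contains_eq_isSome_get?] at hc
      exact Option.isSome_iff_exists.mp hc
    have hLL : L = L' := PySem.Dict.getD_of_get?_eq_some g [] hL'
    have hmg : (pvMapWorst g).get? sec = some (pvWorst L) := by
      rw [get?_pvMapWorst, hL', hLL]; rfl
    have hmgd : (pvMapWorst g).getD sec "" = pvWorst L :=
      PySem.Dict.getD_of_get?_eq_some _ "" hmg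
    have hmnd : (pvMapWorst g).keys.Nodup := by rw [keys_pvMapWorst]; exact hnd
    rw [if_pos hmc]
    by_cases h1 : "NO CUMPLE" ∈ statuses
    · simp only [if_pos h1, pvWorst_append_NC]
    · simp only [if_neg h1]
      by_cases h2 : "FUERA DE TOLERANCIA" ∈ statuses
      · by_cases hN : "NO CUMPLE" ∈ L
        · have hcond : ¬("FUERA DE TOLERANCIA" ∈ statuses ∧
              (pvMapWorst g).getD sec "" ≠ "NO CUMPLE") := by
            rw [hmgd, pvWorst_of_NC hN]; simp
          have hmem : "NO CUMPLE" ∈ L ++ ["FUERA DE TOLERANCIA"] := by simp [hN]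
          simp only [if_neg hcond, if_pos h2, pvWorst_of_NC hmem]
          exact (insert_get?_self _ _ _ hmnd (by rw [hmg, pvWorst_of_NC hN])).symm
        · have hcond : ("FUERA DE TOLERANCIA" ∈ statuses ∧
              (pvMapWorst g).getD sec "" ≠ "NO CUMPLE") := by
            rw [hmgd]; exact ⟨h2, pvWorst_ne_NC hN⟩
          simp only [if_pos hcond, if_pos h2, pvWorst_append_FT hN]
      · have hcond : ¬("FUERA DE TOLERANCIA" ∈ statuses ∧
            (pvMapWorst g).getD sec "" ≠ "NO CUMPLE") := fun h => h2 h.1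
        simp only [if_neg h2, if_neg hcond, pvWorst_append_C]
        exact (insert_get?_self _ _ _ hmnd (by rw [hmg])).symm
  · -- new section
    have hmc : (pvMapWorst g).contains sec = false := by
      rw [contains_pvMapWorst]; simpa using hc
    have hnone : g.get? sec = none := by
      cases hg : g.get? sec with
      | none => rfl
      | some x => exact absurd (by rw [PySem.Dict.contains_eq_isSome_get?, hg]; rfl) hc
    have hLnil : L = [] := by
      rw [hL, PySem.Dict.getD_eq_get?_getD, hnone]; rfl
    rw [if_neg (ne_true_of_eq_false hmc), hLnil]
    by_cases h1 : "NO CUMPLE" ∈ statuses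
    · simp only [if_pos h1, pvWorst_append_NC, PySem.Dict.insert_insert_self]
    · simp only [if_neg h1]
      by_cases h2 : "FUERA DE TOLERANCIA" ∈ statuses
      · have hgd : ((pvMapWorst g).insert sec "CUMPLE").getD sec "" = "CUMPLE" :=
          PySem.Dict.getD_insert_self _ _ _ _
        have hcond : ("FUERA DE TOLERANCIA" ∈ statuses ∧
            ((pvMapWorst g).insert sec "CUMPLE").getD sec "" ≠ "NO CUMPLE") := by
          rw [hgd]; exact ⟨h2, by decide⟩
        have hfe : pvWorst (([] : List String) ++ ["FUERA DE TOLERANCIA"]) =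
            "FUERA DE TOLERANCIA" := pvWorst_append_FT (by simp)
        simp only [if_pos hcond, if_pos h2, hfe, PySem.Dict.insert_insert_self]
      · have hcond : ¬("FUERA DE TOLERANCIA" ∈ statuses ∧
            ((pvMapWorst g).insert sec "CUMPLE").getD sec "" ≠ "NO CUMPLE") := fun h => h2 h.1
        simp only [if_neg h2, if_neg hcond, pvWorst_append_C]
        simp [pvWorst]

theorem nodup_stepB (g : PySem.Dict String (List String)) (c : List (String × String))
    (hnd : g.keys.Nodup) : (pvStepB g c).keys.Nodup := by
  simp only [pvStepB, PySem.Dict.modify]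
  exact PySem.Dict.nodup_keys_insert _ _ _ hnd

theorem fold_eq (l : List (List (String × String))) (g : PySem.Dict String (List String))
    (hnd : g.keys.Nodup) :
    l.foldl pvStepA (pvMapWorst g) = pvMapWorst (l.foldl pvStepB g) := by
  induction l generalizing g with
  | nil => rfl
  | cons c t ih =>
    simp only [List.foldl_cons]
    rw [step_eq g c hnd]
    exact ih _ (nodup_stepB g c hnd)

theorem nodup_foldB (l : List (List (String × String))) :
    (l.foldl pvStepB PySem.Dict.empty).keys.Nodup := by
  suffices h : ∀ (g : PySem.Dict String (List String)), g.keys.Nodup →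
      (l.foldl pvStepB g).keys.Nodup by
    exact h _ PySem.Dict.nodup_keys_empty
  induction l with
  | nil => intro g hg; exact hg
  | cons c t ih => intro g hg; exact ih _ (nodup_stepB g c hg)

-- ===== VERDICT (by name: the statement is the Claim_ definition above) =====
theorem build_section_status_map_py_spec : Claim_equal_build_section_status_map_py := by
  intro cr _
  unfold Spec_build_section_status_map_py build_section_status_map_py build_section_status_map_py_alt
  set groups := cr.foldl pvStepB PySem.Dict.empty with hg
  have hA : cr.foldl pvStepA PySem.Dict.empty = pvMapWorst groups := by
    have := fold_eq cr PySem.Dict.empty PySem.Dict.nodup_keys_empty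
    simpa [pvMapWorst, PySem.Dict.empty] using this
  rw [hA]
  have hbody : (fun (r : PySem.Dict String String) (p : String × List String) =>
      if "NO CUMPLE" ∈ p.2 then r.insert p.1 "NO CUMPLE"
      else if "FUERA DE TOLERANCIA" ∈ p.2 then r.insert p.1 "FUERA DE TOLERANCIA"
      else r.insert p.1 "CUMPLE") = fun r p => r.insert p.1 (pvWorst p.2) := by
    funext r p
    simp only [pvWorst]
    split_ifs <;> rfl
  rw [hbody, PySem.Dict.items_foldl_insert_fresh groups.items Prod.fst (fun p => pvWorst p.2)
    PySem.Dict.empty (fun a _ => PySem.Dict.contains_empty _) (nodup_foldB cr)]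
  rfl
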